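-- pv_equiv track=rewrite | github.com/PTIT-D22KH/python-codeptit | submit/py01027/py01027.py | check
-- ===== SOURCE A (Python) =====
-- def check(s):
--     count = 0
--     for c in s:
--         if c != '6' and c != '8':
--             return False
--         if c == '8':
--             count += 1
--         else:
--             count = 0
--         if count == 3:
--             return False
--     return True
-- ===== SOURCE B (Python) =====
-- def check(s):
--     return set(s) <= {'6', '8'} and '888' not in s
-- ===== Notes on version B (the rewrite author's own statement) =====
-- stated objective: idiomatic
-- what changed: Replaces the character-by-character loop with a running count of consecutive '8's by two whole-string checks: a set-subset test of the alphabet against {'6','8'} and a substring test for '888'.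
import Mathlib
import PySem

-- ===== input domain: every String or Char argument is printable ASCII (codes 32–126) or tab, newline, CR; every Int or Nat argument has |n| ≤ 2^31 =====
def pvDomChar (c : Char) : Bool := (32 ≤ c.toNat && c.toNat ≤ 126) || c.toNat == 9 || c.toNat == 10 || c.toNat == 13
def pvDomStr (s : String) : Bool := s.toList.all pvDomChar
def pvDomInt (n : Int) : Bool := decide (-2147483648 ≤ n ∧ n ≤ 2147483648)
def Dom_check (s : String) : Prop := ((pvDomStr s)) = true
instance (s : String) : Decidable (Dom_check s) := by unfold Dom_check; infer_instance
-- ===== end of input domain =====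

-- ===== PORT A =====
-- Port of A: the for-loop with its running count of consecutive '8's, early returns as recursion.
def checkLoop : List Char → Int → Bool
  | [], _ => true
  | c :: t, count =>
    if !(c == '6') && !(c == '8') then false
    else
      let count' : Int := if c == '8' then count + 1 else 0
      if count' == 3 then false else checkLoop t count'

def check (s : String) : Bool := checkLoop s.toList 0

-- ===== PORT B =====
-- Port of B: set(s) <= {'6','8'} and '888' not in s
def check_alt (s : String) : Bool :=
  PySem.Set.issubset (PySem.Set.ofList s.toList) (PySem.Set.ofList ['6', '8'])
    && !(PySem.Str.isIn "888" s)

-- ===== PRECONDITION & SPEC =====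
def Spec_check (s : String) (out : Bool) : Prop := out = check_alt s
instance (s : String) (out : Bool) : Decidable (Spec_check s out) := by unfold Spec_check; infer_instance

-- ===== CLAIM (what is proved, stated in full; the proofs are below) =====
def Claim_equal_check : Prop := ∀ (s : String), Dom_check s → Spec_check s (check s)

-- ===== LEMMAS AND PROOFS =====


lemma checkLoop_eq (cs : List Char) : ∀ count : Int, 0 ≤ count → count ≤ 2 →
    checkLoop cs count =
      (cs.all (fun c => c == '6' || c == '8') &&
        !(decide (List.replicate (3 - count).toNat '8' <+: cs ∨ ['8', '8', '8'] <:+: cs))) := by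
  induction cs with
  | nil =>
    intro count h0 h2
    interval_cases count <;> simp [checkLoop, List.replicate]
  | cons c t ih =>
    intro count h0 h2
    by_cases h8 : c = '8'
    · subst h8
      interval_cases count
      · rw [show checkLoop ('8' :: t) 0 = checkLoop t 1 from rfl, ih 1 (by norm_num) (by norm_num)]
        rw [Bool.eq_iff_iff]
        simp [show ((2:Int).toNat) = 2 from rfl, show ((3:Int).toNat) = 3 from rfl,
          List.replicate, List.infix_cons_iff, List.cons_prefix_cons]
      · rw [show checkLoop ('8' :: t) 1 = checkLoop t 2 from rfl, ih 2 (by norm_num) (by norm_num)]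
        rw [Bool.eq_iff_iff]
        simp [show ((1:Int).toNat) = 1 from rfl, show ((2:Int).toNat) = 2 from rfl,
          List.replicate, List.infix_cons_iff, List.cons_prefix_cons]
        have h21 : (['8', '8'] : List Char) <+: t → (['8'] : List Char) <+: t :=
          fun h => List.IsPrefix.trans ⟨['8'], rfl⟩ h
        tauto
      · rw [show checkLoop ('8' :: t) 2 = false from rfl]
        norm_num [List.replicate, List.cons_prefix_cons]
    · by_cases h6 : c = '6'
      · subst h6
        rw [show checkLoop ('6' :: t) count = checkLoop t 0 from rfl, ih 0 (by norm_num) (by norm_num)]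
        obtain ⟨k, hk⟩ : ∃ k, (3 - count).toNat = k + 1 := ⟨(2 - count).toNat, by omega⟩
        rw [Bool.eq_iff_iff, hk]
        simp [show ((3:Int).toNat) = 3 from rfl, List.replicate, List.infix_cons_iff,
          List.cons_prefix_cons]
        have h3i : (['8', '8', '8'] : List Char) <+: t → (['8', '8', '8'] : List Char) <:+: t :=
          List.IsPrefix.isInfix
        tauto
      · simp [checkLoop, h8, h6]

lemma check_eq_alt (s : String) : check s = check_alt s := by
  rw [check, check_alt, checkLoop_eq s.toList 0 (by norm_num) (by norm_num)]
  have hall : (PySem.Set.ofList s.toList).issubset (PySem.Set.ofList ['6', '8'])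
      = s.toList.all (fun c => c == '6' || c == '8') := by
    rw [Bool.eq_iff_iff]
    constructor
    · intro hsub
      rw [List.all_eq_true]
      intro x hx
      have := (PySem.Set.issubset_iff ..).mp hsub x ((PySem.Set.mem_ofList ..).mpr hx)
      rw [PySem.Set.mem_ofList] at this
      simpa using this
    · intro h
      apply (PySem.Set.issubset_iff ..).mpr
      intro x hx
      rw [PySem.Set.mem_ofList] at hx ⊢
      have := List.all_eq_true.mp h x hx
      simpa using this
  have hin : PySem.Str.isIn "888" s = decide (['8', '8', '8'] <:+: s.toList) := by
    rw [Bool.eq_iff_iff, PySem.Str.isIn_iff_infix]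
    simp [show ("888" : String).toList = ['8', '8', '8'] from rfl]
  rw [hall, hin]
  have hPQ : decide (List.replicate ((3 : Int) - 0).toNat '8' <+: s.toList
        ∨ ['8', '8', '8'] <:+: s.toList) = decide (['8', '8', '8'] <:+: s.toList) := by
    rw [decide_eq_decide]
    constructor
    · rintro (h | h)
      · exact ((show List.replicate ((3 : Int) - 0).toNat '8' = ['8', '8', '8'] from rfl) ▸ h).isInfix
      · exact h
    · exact Or.inr
  rw [hPQ]

-- ===== VERDICT (by name: the statement is the Claim_ definition above) =====
theorem check_spec : Claim_equal_check := by
  intro s _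
  unfold Spec_check
  exact check_eq_alt s
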